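-- pv_equiv track=rewrite | github.com/jonathan-karl/applied-social-data-science | Computer Programming/assignment-final-jonathan-karl/data_preparation.py | get_first_three_kill_cheaters
-- ===== SOURCE A (Python) =====
-- def get_first_three_kill_cheaters(games_dict):
--     '''Takes dictionary of games:list of kills as argument.
--     Returns a list of account-ids representing the first cheater
--     that committed three kills for every game (or a 0 if no cheater
--     committed a kill), i.e. the length of the list will be equal to
--     the number of keys in the dict.'''
--
--     # Initialise empty list
--     three_kill_cheaters = []
--
--     for game in games_dict.values():
--
--         # Add all killers in kills that were committed by cheaters
--         game_all_cheaters = [kill[0] for kill in game if 1 in kill]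
--
--         # Set the value to be added to the list "three_kill_cheaters"
--         # to be 0 by default
--         the_cheater = 0
--
--         # Initialise a dictionary that records kills of all cheaters
--         # in timely order, set "the_cheater" to the account-id that
--         # is first found to kill thrice, then break loop
--         cheater_occurence_dict={}
--         for i in game_all_cheaters:
--             if game_all_cheaters.count(i) > 2:
--                 if i in cheater_occurence_dict:
--                     cheater_occurence_dict[i] += 1
--                 else:
--                     cheater_occurence_dict[i] = 1
--                 if cheater_occurence_dict[i] == 3:
--                     the_cheater = i
--                     break
--
--         # Append the account-id (or 0 if no cheater killed more
--         # than 2 times to the "three_kill_cheaters"-list.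
--         three_kill_cheaters.append(the_cheater)
--
--     return three_kill_cheaters
-- ===== SOURCE B (Python) =====
-- def get_first_three_kill_cheaters(games_dict):
--     '''Index-table reformulation: per game, group cheater-kill indices by
--     account, then pick the account whose third kill happens earliest.'''
--     three_kill_cheaters = []
--     for game in games_dict.values():
--         cheaters = [kill[0] for kill in game if 1 in kill]
--         positions = {}
--         for idx, acc in enumerate(cheaters):
--             positions.setdefault(acc, []).append(idx)
--         thirds = [ps[2] for ps in positions.values() if len(ps) >= 3]
--         if thirds:
--             three_kill_cheaters.append(cheaters[min(thirds)])
--         else: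
--             three_kill_cheaters.append(0)
--     return three_kill_cheaters
-- ===== Notes on version B (the rewrite author's own statement) =====
-- stated objective: alternative
-- what changed: A's early-breaking forward scan with a running occurrence counter is replaced by building a per-account index table (account -> list of positions in the cheater list) and selecting the account whose third-occurrence index is smallest.
import Mathlib
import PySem

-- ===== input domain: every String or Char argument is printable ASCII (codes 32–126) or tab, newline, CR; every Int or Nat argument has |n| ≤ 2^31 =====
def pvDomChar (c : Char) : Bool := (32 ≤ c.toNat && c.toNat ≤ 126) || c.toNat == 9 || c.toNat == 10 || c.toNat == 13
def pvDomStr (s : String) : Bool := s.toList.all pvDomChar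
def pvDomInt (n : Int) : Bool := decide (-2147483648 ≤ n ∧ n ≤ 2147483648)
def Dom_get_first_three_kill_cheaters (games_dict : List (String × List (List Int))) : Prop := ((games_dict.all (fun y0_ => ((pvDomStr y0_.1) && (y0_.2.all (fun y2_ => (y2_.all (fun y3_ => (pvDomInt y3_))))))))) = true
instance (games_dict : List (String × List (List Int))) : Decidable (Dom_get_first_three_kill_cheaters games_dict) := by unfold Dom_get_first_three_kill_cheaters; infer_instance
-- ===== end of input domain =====

-- B replaces A's early-breaking scan-with-counter by a per-account index table plus an argmin
-- over third-occurrence positions (alternative algorithm, same cost class).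


-- ===== PORT A =====
-- [kill[0] for kill in game if 1 in kill]  (identical line in A and B; kill[0] is in range
-- because the guard '1 in kill' forces kill to be nonempty, so pyGetD is exact here)
def cheatersOf (game : List (List Int)) : List Int :=
  (game.filter (fun kill => kill.contains 1)).map (fun kill => PySem.List.pyGetD kill 0 0)

-- A's inner 'for i in game_all_cheaters' loop with its break (returning 0 when the loop ends
-- without a break, like the_cheater's default)
def aLoop (full : List Int) : List Int → PySem.Dict Int Int → Int
  | [], _ => 0
  | i :: rest, d =>
    if 2 < PySem.List.count full i then
      let d' := if d.contains i then d.modify i 0 (· + 1) else d.insert i 1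
      if d'.getD i 0 = 3 then i else aLoop full rest d'
    else aLoop full rest d

def get_first_three_kill_cheaters (games_dict : List (String × List (List Int))) : List Int :=
  (games_dict.map (fun kv => kv.2)).foldl
    (fun acc game =>
      let game_all_cheaters := cheatersOf game
      acc ++ [aLoop game_all_cheaters game_all_cheaters PySem.Dict.empty]) []

-- ===== PORT B =====
-- B's per-game body on the cheater list: group indices by account (positions), keep accounts
-- with ≥ 3 kills, take the minimum third-occurrence index (ps[2] is in range by the filter;
-- min(thirds) is a valid index into cheaters, so pyGetD is exact here)
def altCore (cheaters : List Int) : Int :=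
  let positions := (PySem.List.enumerate cheaters 0).foldl
      (fun d p => d.modify p.2 [] (fun l => l ++ [p.1])) PySem.Dict.empty
  let thirds := (positions.values.filter (fun ps => 3 ≤ ps.length)).map
      (fun ps => PySem.List.pyGetD ps 2 0)
  match PySem.List.min? thirds (fun j => j) with
  | some j => PySem.List.pyGetD cheaters j 0
  | none => 0

def get_first_three_kill_cheaters_alt (games_dict : List (String × List (List Int))) : List Int :=
  (games_dict.map (fun kv => kv.2)).foldl
    (fun acc game => acc ++ [altCore (cheatersOf game)]) []

-- ===== PRECONDITION & SPEC =====
def Spec_get_first_three_kill_cheaters (games_dict : List (String × List (List Int))) (out : List Int) : Prop := out = get_first_three_kill_cheaters_alt games_dict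
instance (games_dict : List (String × List (List Int))) (out : List Int) : Decidable (Spec_get_first_three_kill_cheaters games_dict out) := by unfold Spec_get_first_three_kill_cheaters; infer_instance

-- ===== CLAIM (what is proved, stated in full; the proofs are below) =====
def Claim_equal_get_first_three_kill_cheaters : Prop := ∀ (games_dict : List (String × List (List Int))), Dom_get_first_three_kill_cheaters games_dict → Spec_get_first_three_kill_cheaters games_dict (get_first_three_kill_cheaters games_dict)

-- ===== LEMMAS AND PROOFS =====

-- index of the (k+1)-th occurrence of a in a list
def occIdx (a : Int) : List Int → Nat → Option Nat
  | [], _ => none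
  | x :: t, k =>
    if x = a then
      match k with
      | 0 => some 0
      | k + 1 => (occIdx a t k).map (· + 1)
    else (occIdx a t k).map (· + 1)

lemma occIdx_isSome (a : Int) : ∀ (cs : List Int) (k : Nat),
    (occIdx a cs k).isSome ↔ k < cs.count a := by
  intro cs
  induction cs with
  | nil => intro k; simp [occIdx]
  | cons x t ih =>
      intro k
      by_cases hx : x = a
      · cases k with
        | zero => simp [occIdx, hx, List.count_cons]
        | succ k => simp [occIdx, hx, List.count_cons, ih]
      · simp [occIdx, hx, List.count_cons, ih, Ne.symm hx]


lemma occIdx_spec (a : Int) : ∀ (cs : List Int) (k j : Nat), occIdx a cs k = some j →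
    j < cs.length ∧ cs.getD j 0 = a ∧ (cs.take (j + 1)).count a = k + 1 := by
  intro cs
  induction cs with
  | nil => intro k j h; simp [occIdx] at h
  | cons x t ih =>
      intro k j h
      by_cases hx : x = a
      · cases k with
        | zero =>
            simp [occIdx, hx] at h
            subst h; simp [hx]
        | succ k =>
            simp [occIdx, hx] at h
            obtain ⟨j', hj', rfl⟩ := h
            obtain ⟨h1, h2, h3⟩ := ih k j' hj'
            refine ⟨by simpa using h1, by simpa using h2, ?_⟩
            simp [List.count_cons, hx, h3]
      · simp [occIdx, hx] at h
        obtain ⟨j', hj', rfl⟩ := h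
        obtain ⟨h1, h2, h3⟩ := ih k j' hj'
        refine ⟨by simpa using h1, by simpa using h2, ?_⟩
        simp [List.count_cons, hx, h3, Ne.symm hx]


lemma occIdx_inverse (a : Int) : ∀ (cs : List Int) (k j : Nat), j < cs.length →
    cs.getD j 0 = a → (cs.take (j + 1)).count a = k + 1 → occIdx a cs k = some j := by
  intro cs
  induction cs with
  | nil => intro k j h; simp at h
  | cons x t ih =>
      intro k j hj hget hcnt
      cases j with
      | zero =>
          simp at hget
          cases k with
          | zero => simp [occIdx, hget]
          | succ k => simp [List.count_cons, hget, List.take, List.count_nil] at hcnt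
      | succ j =>
          simp at hj hget
          by_cases hx : x = a
          · simp [List.take, List.count_cons, hx] at hcnt
            cases k with
            | zero =>
                exfalso
                have ht : t[j]? = some a := by
                  rw [List.getElem?_eq_getElem hj]
                  simp [List.getD_eq_getElem?_getD, List.getElem?_eq_getElem hj] at hget
                  exact congrArg some hget
                have hmem : a ∈ t.take (j+1) := by
                  apply List.mem_of_getElem? (i := j)
                  rw [List.getElem?_take]
                  simpa using ht
                have := List.count_pos_iff.mpr hmem
                omega
            | succ k =>
                simp [occIdx, hx]
                exact ih k j hj hget (by omega)
          · simp [List.take, List.count_cons, Ne.symm hx, hx] at hcnt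
            simp [occIdx, hx]
            exact ih k j hj hget hcnt


-- the grouped position list of account a, with enumerate started at s
lemma posList_getElem? (a : Int) : ∀ (cs : List Int) (s : Int) (k : Nat),
    (((PySem.List.enumerate cs s).filter (fun p => p.2 == a)).map (fun p => p.1))[k]? =
      (occIdx a cs k).map (fun j => s + (j : Int)) := by
  intro cs
  induction cs with
  | nil => intro s k; simp [PySem.List.enumerate_nil, occIdx]
  | cons x t ih =>
      intro s k
      rw [PySem.List.enumerate_cons]
      by_cases hx : x = a
      · cases k with
        | zero => simp [occIdx, hx]
        | succ k =>
            simp only [List.filter_cons, occIdx, if_pos hx,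
              show ((s, x).2 == a) = true by simpa using hx, if_true,
              List.map_cons, List.getElem?_cons_succ, ih (s+1)]
            cases occIdx a t k with
            | none => simp
            | some j => simp; ring
      · simp only [List.filter_cons, occIdx, if_neg hx,
          show ((s, x).2 == a) = false by simpa using hx, Bool.false_eq_true, if_false, ih (s+1)]
        cases occIdx a t k with
        | none => simp
        | some j => simp; ring


lemma posList_length (a : Int) : ∀ (cs : List Int) (s : Int),
    (((PySem.List.enumerate cs s).filter (fun p => p.2 == a)).map (fun p => p.1)).length =
      cs.count a := by
  intro cs
  induction cs with
  | nil => intro s; simp [PySem.List.enumerate_nil]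
  | cons x t ih =>
      intro s
      rw [PySem.List.enumerate_cons]
      by_cases hx : x = a
      · simp [List.filter_cons, hx, List.count_cons, ih (s+1)]
      · simp [List.filter_cons, hx, List.count_cons, Ne.symm hx, ih (s+1)]


-- keys of the grouping fold
lemma group_mem_keys : ∀ (l : List (Int × Int)) (d : PySem.Dict Int (List Int)) (x : Int),
    x ∈ ((l.foldl (fun d p => d.modify p.2 [] (fun v => v ++ [p.1])) d).keys) ↔
      x ∈ l.map (fun p => p.2) ∨ x ∈ d.keys := by
  intro l
  induction l with
  | nil => intro d x; simp
  | cons p t ih =>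
      intro d x
      simp only [List.foldl_cons, List.map_cons, List.mem_cons, ih]
      rw [PySem.Dict.keys_modify, PySem.Dict.mem_keys_insert]
      tauto


lemma group_nodup_keys : ∀ (l : List (Int × Int)) (d : PySem.Dict Int (List Int)),
    d.keys.Nodup → ((l.foldl (fun d p => d.modify p.2 [] (fun v => v ++ [p.1])) d).keys).Nodup := by
  intro l
  induction l with
  | nil => intro d h; simpa using h
  | cons p t ih =>
      intro d h
      simp only [List.foldl_cons]
      apply ih
      rw [PySem.Dict.keys_modify]
      exact PySem.Dict.nodup_keys_insert _ _ _ h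


lemma group_getD (cs : List Int) (s a : Int) :
    ((PySem.List.enumerate cs s).foldl (fun d p => d.modify p.2 [] (fun v => v ++ [p.1]))
        PySem.Dict.empty).getD a [] =
      ((PySem.List.enumerate cs s).filter (fun p => p.2 == a)).map (fun p => p.1) := by
  have h := PySem.Dict.getD_foldl_modify_append ((PySem.List.enumerate cs s).map Prod.swap)
      (PySem.Dict.empty) a
  rw [List.foldl_map] at h
  simp only [Prod.swap] at h
  rw [List.filter_map, List.map_map] at h
  simpa [Function.comp, PySem.Dict.getD_empty] using h


-- membership in B's thirds list
lemma mem_thirds (cs : List Int) (j : Int) :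
    (j ∈ (((((PySem.List.enumerate cs 0).foldl
        (fun d p => d.modify p.2 [] (fun l => l ++ [p.1])) PySem.Dict.empty).values).filter
          (fun ps => 3 ≤ ps.length)).map (fun ps => PySem.List.pyGetD ps 2 0))) ↔
      ∃ (a : Int) (jn : Nat), occIdx a cs 2 = some jn ∧ j = (jn : Int) := by
  set F := ((PySem.List.enumerate cs 0).foldl
      (fun d p => d.modify p.2 [] (fun l => l ++ [p.1])) PySem.Dict.empty) with hF
  have hnodup : F.keys.Nodup := by
    apply group_nodup_keys
    simp [PySem.Dict.keys_empty]
  constructor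
  · intro hj
    rw [List.mem_map] at hj
    obtain ⟨ps, hps, hval⟩ := hj
    rw [List.mem_filter] at hps
    obtain ⟨hpsv, hlen⟩ := hps
    have : ∃ pr ∈ F.items, pr.2 = ps := List.mem_map.mp hpsv
    obtain ⟨pr, hpr, rfl⟩ := this
    have hgd : F.getD pr.1 [] = pr.2 := PySem.Dict.getD_of_mem_items F (by exact hpr) hnodup []
    rw [hF, group_getD] at hgd
    have hlen' : 3 ≤ cs.count pr.1 := by
      rw [← posList_length pr.1 cs 0, hgd]
      simpa using hlen
    have hsome : (occIdx pr.1 cs 2).isSome := (occIdx_isSome pr.1 cs 2).mpr (by omega)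
    obtain ⟨jn, hjn⟩ := Option.isSome_iff_exists.mp hsome
    refine ⟨pr.1, jn, hjn, ?_⟩
    have h2 : pr.2[2]? = some ((jn : Int)) := by
      rw [← hgd, posList_getElem? pr.1 cs 0 2, hjn]; simp
    rw [← hval, PySem.List.pyGetD_ofNat', List.getD_eq_getElem?_getD, h2]
    rfl
  · rintro ⟨a, jn, hjn, rfl⟩
    have hcnt : 2 < cs.count a := (occIdx_isSome a cs 2).mp (by simp [hjn])
    have hmem : a ∈ cs := List.count_pos_iff.mp (by omega)
    have hk : a ∈ F.keys := by
      rw [hF, group_mem_keys]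
      left
      rw [PySem.List.map_snd_enumerate]
      exact hmem
    obtain ⟨pr, hpr, hpr1⟩ := List.mem_map.mp hk
    have hpr' : (a, pr.2) ∈ F.items := by
      have : pr = (a, pr.2) := by rw [← hpr1]
      rwa [this] at hpr
    have hgd : F.getD a [] = pr.2 := PySem.Dict.getD_of_mem_items F hpr' hnodup []
    rw [hF, group_getD] at hgd
    rw [List.mem_map]
    refine ⟨pr.2, ?_, ?_⟩
    · rw [List.mem_filter]
      constructor
      · exact List.mem_map.mpr ⟨(a, pr.2), hpr', rfl⟩
      · have : pr.2.length = cs.count a := by rw [← hgd, posList_length]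
        simp [this]; omega
    · have h2 : pr.2[2]? = some ((jn : Int)) := by
        rw [← hgd, posList_getElem? a cs 0 2, hjn]; simp
      rw [PySem.List.pyGetD_ofNat', List.getD_eq_getElem?_getD, h2]
      rfl


-- A's loop as a prefix-walking reference scan
def ref (pre : List Int) : List Int → Int
  | [] => 0
  | i :: rest => if (pre ++ [i]).count i = 3 then i else ref (pre ++ [i]) rest

lemma aLoop_eq_ref (full : List Int) : ∀ (rest pre : List Int) (d : PySem.Dict Int Int),
    full = pre ++ rest →
    (∀ x : Int, 2 < full.count x → d.getD x 0 = (pre.count x : Int)) →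
    aLoop full rest d = ref pre rest := by
  intro rest
  induction rest with
  | nil => intro pre d _ _; simp [aLoop, ref]
  | cons i rest ih =>
      intro pre d hfull hinv
      have hcnt_app : (pre ++ [i]).count i = pre.count i + 1 := by
        simp [List.count_append]
      have hle : (pre ++ [i]).count i ≤ full.count i := by
        rw [hfull, show pre ++ i :: rest = (pre ++ [i]) ++ rest by simp]
        simp [List.count_append]
      have hfull' : full = (pre ++ [i]) ++ rest := by simp [hfull]
      simp only [aLoop, ref]
      by_cases hc : 2 < PySem.List.count full i
      · have hcL : 2 < full.count i := by rwa [PySem.List.count_eq] at hc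
        have hd' : (if d.contains i then d.modify i 0 (· + 1) else d.insert i 1).getD i 0
            = (pre.count i : Int) + 1 := by
          have hdi := hinv i hcL
          by_cases hcont : d.contains i
          · rw [if_pos hcont, PySem.Dict.getD_modify_self, hdi]
          · have hcf : d.contains i = false := by simpa using hcont
            rw [if_neg hcont, PySem.Dict.getD_insert_self]
            have h0 : d.getD i 0 = 0 := PySem.Dict.getD_of_not_contains d 0 hcf
            rw [h0] at hdi
            omega
        rw [if_pos hc, hd']
        have hinv' : ∀ x : Int, 2 < full.count x →
            (if d.contains i then d.modify i 0 (· + 1) else d.insert i 1).getD x 0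
              = ((pre ++ [i]).count x : Int) := by
          intro x hx
          by_cases hxi : x = i
          · subst hxi
            rw [hd', hcnt_app]
            push_cast
            ring
          · have hcx : (pre ++ [i]).count x = pre.count x := by
              simp [List.count_append, List.count_eq_zero, hxi]
            rw [hcx]
            by_cases hcont : d.contains i
            · rw [if_pos hcont, PySem.Dict.getD_modify d i x 0 (· + 1), if_neg hxi]
              exact hinv x hx
            · rw [if_neg hcont, PySem.Dict.getD_insert, if_neg hxi]
              exact hinv x hx
        by_cases h3 : (pre.count i : Int) + 1 = 3
        · rw [if_pos h3, if_pos (show (pre ++ [i]).count i = 3 by omega)]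
        · rw [if_neg h3, if_neg (show ¬ (pre ++ [i]).count i = 3 by omega)]
          exact ih (pre ++ [i]) _ hfull' hinv'
      · have hcL : ¬ 2 < full.count i := by rwa [PySem.List.count_eq] at hc
        rw [if_neg hc, if_neg (show ¬ (pre ++ [i]).count i = 3 by omega)]
        apply ih (pre ++ [i]) d hfull'
        intro x hx
        have hxi : x ≠ i := by rintro rfl; omega
        have hcx : (pre ++ [i]).count x = pre.count x := by
          simp [List.count_append, List.count_eq_zero, hxi]
        rw [hcx]
        exact hinv x hx


lemma ref_eq_altCore : ∀ (rest pre : List Int), (∀ x : Int, pre.count x ≤ 2) →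
    ref pre rest = altCore (pre ++ rest) := by
  intro rest
  induction rest with
  | nil =>
      intro pre h
      simp only [List.append_nil, ref]
      simp only [altCore]
      have hth : ((((PySem.List.enumerate pre 0).foldl
          (fun d p => d.modify p.2 [] (fun l => l ++ [p.1])) PySem.Dict.empty).values).filter
            (fun ps => 3 ≤ ps.length)).map (fun ps => PySem.List.pyGetD ps 2 0) = [] := by
        rw [List.eq_nil_iff_forall_not_mem]
        intro j hj
        obtain ⟨a, jn, hjn, _⟩ := (mem_thirds pre j).mp hj
        have h2 := (occIdx_isSome a pre 2).mp (by simp [hjn])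
        have := h a
        omega
      rw [hth]
      rfl
  | cons i rest ih =>
      intro pre h
      simp only [ref]
      by_cases h3 : (pre ++ [i]).count i = 3
      · rw [if_pos h3]
        have hlen : pre.length < (pre ++ i :: rest).length := by simp
        have f1 : (pre ++ i :: rest).getD pre.length 0 = i := by
          rw [List.getD_eq_getElem?_getD, List.getElem?_append_right (le_refl _)]
          simp
        have f2 : (pre ++ i :: rest).take (pre.length + 1) = pre ++ [i] := by
          rw [List.take_append]
          simp [List.take_of_length_le (show pre.length ≤ pre.length + 1 by omega)]
        have hocc : occIdx i (pre ++ i :: rest) 2 = some pre.length :=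
          occIdx_inverse i _ 2 pre.length hlen f1 (by rw [f2]; exact h3)
        have hminimal : ∀ (a : Int) (jn : Nat), occIdx a (pre ++ i :: rest) 2 = some jn →
            pre.length ≤ jn := by
          intro a jn hjn
          by_contra hlt
          push_neg at hlt
          obtain ⟨_, _, hcnt⟩ := occIdx_spec a _ 2 jn hjn
          rw [List.take_append] at hcnt
          have hz : jn + 1 - pre.length = 0 := by omega
          rw [hz] at hcnt
          simp only [List.take_zero, List.append_nil] at hcnt
          have hle : (pre.take (jn + 1)).count a ≤ pre.count a :=
            (List.take_sublist _ _).count_le a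
          have := h a
          omega
        simp only [altCore]
        set T := ((((PySem.List.enumerate (pre ++ i :: rest) 0).foldl
            (fun d p => d.modify p.2 [] (fun l => l ++ [p.1])) PySem.Dict.empty).values).filter
              (fun ps => 3 ≤ ps.length)).map (fun ps => PySem.List.pyGetD ps 2 0) with hT
        have hmemT : ((pre.length : Int)) ∈ T := by
          rw [hT]
          exact (mem_thirds _ _).mpr ⟨i, pre.length, hocc, rfl⟩
        have hmin : PySem.List.min? T (fun j => j) = some ((pre.length : Int)) := by
          cases hm : PySem.List.min? T (fun j => j) with
          | none =>
              rw [PySem.List.min?_eq_none_iff] at hm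
              rw [hm] at hmemT
              simp at hmemT
          | some m =>
              have hmem := PySem.List.min?_mem hm
              rw [hT] at hmem
              obtain ⟨a, jm, hjm, rfl⟩ := (mem_thirds _ _).mp hmem
              have h1 := hminimal a jm hjm
              have h2 := PySem.List.min?_isMin hm _ hmemT
              simp only [] at h2
              congr 1
              omega
        rw [hmin]
        show i = PySem.List.pyGetD (pre ++ i :: rest) ((pre.length : Int)) 0
        rw [PySem.List.pyGetD_natCast]
        exact f1.symm
      · rw [if_neg h3]
        have := ih (pre ++ [i]) (by
          intro x
          by_cases hxi : x = i
          · rw [hxi]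
            have hc3 : List.count i (pre ++ [i]) = List.count i pre + 1 := by
              simp [List.count_append]
            have := h i
            omega
          · have hb : List.count x [i] = 0 := List.count_eq_zero.mpr (by simp [hxi])
            have := h x
            simp [List.count_append, hb]
            omega)
        simpa using this


lemma game_eq (cs : List Int) : aLoop cs cs PySem.Dict.empty = altCore cs := by
  have h1 := aLoop_eq_ref cs cs [] PySem.Dict.empty (by simp)
    (fun x _ => by simp [PySem.Dict.getD_empty])
  have h2 := ref_eq_altCore cs [] (fun x => by simp)
  rw [h1]
  simpa using h2

-- ===== VERDICT (by name: the statement is the Claim_ definition above) =====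
theorem get_first_three_kill_cheaters_spec : Claim_equal_get_first_three_kill_cheaters := by
  intro games_dict _
  unfold Spec_get_first_three_kill_cheaters
  unfold get_first_three_kill_cheaters get_first_three_kill_cheaters_alt
  simp only [game_eq]
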